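-- pv_equiv track=rewrite | github.com/garcha-amanjot-au28/fprt-deployment | coding-challenges/week19/day01/frequency.py | solution
-- ===== SOURCE A (Python) =====
-- def solution(arr,n) :
--     h = {}
--     for i in arr :
--         if i in h :
--             h[i] += 1
--         else :
--             h[i] = 1
--     min_freq = min(h.values())
--     max_element = max([ x for x,y in h.items() if y == min_freq ])
--     return max_element
-- ===== SOURCE B (Python) =====
-- def solution(arr, n):
--     s = sorted(arr)
--     best_v = None
--     best_c = None
--     cur_v = s[0]
--     cur_c = 1
--     for v in s[1:]:
--         if v == cur_v:
--             cur_c += 1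
--         else:
--             if best_c is None or cur_c <= best_c:
--                 best_v, best_c = cur_v, cur_c
--             cur_v, cur_c = v, 1
--     if best_c is None or cur_c <= best_c:
--         return cur_v
--     return best_v
-- ===== Notes on version B (the rewrite author's own statement) =====
-- stated objective: alternative
-- what changed: B drops the frequency dict entirely: it sorts the array and scans the consecutive equal runs once, keeping the (value, run length) of the lowest run length with ties broken toward the later, i.e. larger, value.
import Mathlib
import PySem

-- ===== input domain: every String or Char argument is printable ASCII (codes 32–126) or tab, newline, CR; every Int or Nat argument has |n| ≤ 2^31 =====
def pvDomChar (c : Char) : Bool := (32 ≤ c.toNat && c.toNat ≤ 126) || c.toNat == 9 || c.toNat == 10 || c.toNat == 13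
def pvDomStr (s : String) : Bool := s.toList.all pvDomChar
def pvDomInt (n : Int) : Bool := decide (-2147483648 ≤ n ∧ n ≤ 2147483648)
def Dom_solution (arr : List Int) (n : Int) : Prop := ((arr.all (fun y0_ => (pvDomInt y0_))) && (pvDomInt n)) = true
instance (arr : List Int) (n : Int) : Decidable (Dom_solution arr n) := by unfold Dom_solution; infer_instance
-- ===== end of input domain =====

-- B discards A's frequency dict entirely: it sorts the array and scans consecutive runs once,
-- keeping the best (value, run length) with ties toward the later (larger) value (alternative algorithm, O(n log n)).


-- ===== PORT A =====
-- A's counting loop: 'if i in h: h[i] += 1 else: h[i] = 1'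
def freqOf (arr : List Int) : PySem.Dict Int Int :=
  arr.foldl (fun h i => if h.contains i then h.insert i (h.getD i 0 + 1) else h.insert i 1)
    PySem.Dict.empty

def solution (arr : List Int) (n : Int) : Int :=
  let h := freqOf arr
  match PySem.List.min? h.values (fun v => v) with
  | none => 0      -- Python raises ValueError here (empty arr); excluded by Pre_solution
  | some mf =>
    match PySem.List.max? ((h.items.filter (fun p => p.2 == mf)).map (fun p => p.1)) (fun x => x) with
    | none => 0    -- unreachable: the minimum is attained
    | some m => m

-- ===== PORT B =====
-- one loop iteration of Source B's run scan: state (cur_v, cur_c, best), best = none ↔ best_c is None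
def runStep (st : Int × Int × Option (Int × Int)) (v : Int) : Int × Int × Option (Int × Int) :=
  if v == st.1 then (st.1, st.2.1 + 1, st.2.2)
  else
    (v, 1,
      if (match st.2.2 with | none => true | some (_, bc) => decide (st.2.1 ≤ bc)) then
        some (st.1, st.2.1)
      else st.2.2)

def solution_alt (arr : List Int) (n : Int) : Int :=
  let s := PySem.List.sorted arr (fun x => x) false
  match s with
  | [] => 0        -- Python raises IndexError at s[0] here (empty arr); excluded by Pre_solution
  | v0 :: rest =>
    let st := rest.foldl runStep (v0, 1, none)
    match st.2.2 with
    | none => st.1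
    | some (bv, bc) => if st.2.1 ≤ bc then st.1 else bv

-- ===== PRECONDITION & SPEC =====
-- Both Pythons raise on empty arr (ValueError from min / IndexError from s[0]); excluded.
def Pre_solution (arr : List Int) (n : Int) : Prop := arr ≠ []
instance (arr : List Int) (n : Int) : Decidable (Pre_solution arr n) := by unfold Pre_solution; infer_instance
def pvWitness_solution : List Int × Int := ([1, 2, 2], 0)

def Spec_solution (arr : List Int) (n : Int) (out : Int) : Prop := out = solution_alt arr n
instance (arr : List Int) (n : Int) (out : Int) : Decidable (Spec_solution arr n out) := by unfold Spec_solution; infer_instance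

-- ===== CLAIM (what is proved, stated in full; the proofs are below) =====
def Claim_equal_solution : Prop := ∀ (arr : List Int) (n : Int), Dom_solution arr n → Pre_solution arr n → Spec_solution arr n (solution arr n)

-- ===== LEMMAS AND PROOFS =====

-- the specification both programs meet: the largest element of minimal multiplicity
def IsAns (arr : List Int) (r : Int) : Prop :=
  r ∈ arr ∧ (∀ x ∈ arr, arr.count r ≤ arr.count x) ∧ (∀ x ∈ arr, arr.count x = arr.count r → x ≤ r)


theorem isAns_unique {arr : List Int} {r r' : Int} (h : IsAns arr r) (h' : IsAns arr r') : r = r' := by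
  obtain ⟨hm, hmin, htie⟩ := h
  obtain ⟨hm', hmin', htie'⟩ := h'
  have h1 : arr.count r ≤ arr.count r' := hmin r' hm'
  have h2 : arr.count r' ≤ arr.count r := hmin' r hm
  have := htie r' hm' (by omega)
  have := htie' r hm (by omega)
  omega

-- A's counting loop is Counter(arr)
theorem freqOf_eq_counter (arr : List Int) : freqOf arr = PySem.Dict.counter arr := by
  unfold freqOf
  rw [← PySem.Dict.foldl_insert_getD_add_one_eq_counter]
  congr 1
  funext h i
  by_cases hc : h.contains i = true
  · simp [hc]
  · have h0 : h.getD i 0 = 0 := PySem.Dict.getD_of_not_contains h 0 (by simpa using hc)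
    simp [hc, h0]

theorem solution_isAns (arr : List Int) (n : Int) (hne : arr ≠ []) : IsAns arr (solution arr n) := by
  have hitems : (freqOf arr).items = (PySem.Set.ofList arr).map (fun k => (k, (arr.count k : Int))) := by
    rw [freqOf_eq_counter]; exact PySem.Dict.items_counter arr
  have hvals : (freqOf arr).values = (PySem.Set.ofList arr).map (fun k => (arr.count k : Int)) := by
    simp only [PySem.Dict.values, hitems, List.map_map]; rfl
  obtain ⟨x0, hx0⟩ := List.exists_mem_of_ne_nil arr hne
  have hx0S : x0 ∈ PySem.Set.ofList arr := (PySem.Set.mem_ofList arr x0).mpr hx0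
  cases hm : PySem.List.min? (freqOf arr).values (fun v => v) with
  | none =>
    have := (PySem.List.min?_eq_none_iff _ _).mp hm
    rw [hvals] at this
    rw [List.map_eq_nil_iff] at this
    rw [this] at hx0S
    exact absurd hx0S List.not_mem_nil
  | some mf =>
    have hmfmem := PySem.List.min?_mem hm
    have hmfmin := PySem.List.min?_isMin hm
    rw [hvals] at hmfmem
    obtain ⟨k, hkS, hkc⟩ := List.mem_map.mp hmfmem
    -- k goes through the filter, so the filtered list is nonempty
    have hkL : k ∈ ((freqOf arr).items.filter (fun p => p.2 == mf)).map (fun p => p.1) := by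
      refine List.mem_map.mpr ⟨(k, (arr.count k : Int)), List.mem_filter.mpr ⟨?_, by simp [hkc]⟩, rfl⟩
      rw [hitems]; exact List.mem_map.mpr ⟨k, hkS, rfl⟩
    cases hM : PySem.List.max? (((freqOf arr).items.filter (fun p => p.2 == mf)).map (fun p => p.1)) (fun x => x) with
    | none =>
      have := (PySem.List.max?_eq_none_iff _ _).mp hM
      rw [this] at hkL
      exact absurd hkL List.not_mem_nil
    | some M =>
      have hMmem := PySem.List.max?_mem hM
      have hMmax := PySem.List.max?_isMax hM
      obtain ⟨p, hpf, hp1⟩ := List.mem_map.mp hMmem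
      obtain ⟨hpl, hpeq⟩ := List.mem_filter.mp hpf
      rw [hitems] at hpl
      obtain ⟨k', hk'S, hk'p⟩ := List.mem_map.mp hpl
      have hMS : M ∈ PySem.Set.ofList arr := by rw [← hp1, ← hk'p]; exact hk'S
      have hMc : (arr.count M : Int) = mf := by
        have := beq_iff_eq.mp hpeq
        rw [← hk'p] at this hp1
        simp at this hp1
        rw [hp1] at this; exact this
      have hsol : solution arr n = M := by simp only [solution, hm, hM]
      rw [hsol]
      refine ⟨(PySem.Set.mem_ofList arr M).mp hMS, ?_, ?_⟩
      · intro x hx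
        have hxS : x ∈ PySem.Set.ofList arr := (PySem.Set.mem_ofList arr x).mpr hx
        have : mf ≤ (arr.count x : Int) := by
          have := hmfmin _ (by rw [hvals]; exact List.mem_map.mpr ⟨x, hxS, rfl⟩)
          simpa using this
        omega
      · intro x hx hcx
        have hxS : x ∈ PySem.Set.ofList arr := (PySem.Set.mem_ofList arr x).mpr hx
        have hxL : x ∈ ((freqOf arr).items.filter (fun p => p.2 == mf)).map (fun p => p.1) := by
          refine List.mem_map.mpr ⟨(x, (arr.count x : Int)), List.mem_filter.mpr ⟨?_, by simp [hcx, hMc]⟩, rfl⟩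
          rw [hitems]; exact List.mem_map.mpr ⟨x, hxS, rfl⟩
        simpa using hMmax _ hxL

-- loop invariant of B's run scan: pre is the processed prefix of the sorted list s
def RunInv (s pre : List Int) (cv cc : Int) (best : Option (Int × Int)) : Prop :=
  cv ∈ pre ∧ (∀ x ∈ pre, x ≤ cv) ∧ cc = (pre.count cv : Int) ∧
  (∀ x ∈ pre, x ≠ cv → s.count x = pre.count x) ∧
  (match best with
   | none => ∀ x ∈ pre, x = cv
   | some (bv, bc) => bv ∈ pre ∧ bv ≠ cv ∧ bc = (s.count bv : Int) ∧
       ∀ x ∈ pre, x ≠ cv → (s.count bv ≤ s.count x ∧ (s.count x = s.count bv → x ≤ bv)))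

theorem step_inv (s pre t' : List Int) (v cv cc : Int) (best : Option (Int × Int))
    (hs : List.Pairwise (fun a b : Int => a ≤ b) s)
    (hpre : s = pre ++ v :: t') (hinv : RunInv s pre cv cc best) :
    RunInv s (pre ++ [v]) (runStep (cv, cc, best) v).1 (runStep (cv, cc, best) v).2.1
      (runStep (cv, cc, best) v).2.2 := by
  obtain ⟨h1, h2, h3, h4, h5⟩ := hinv
  have hcross : ∀ x ∈ pre, ∀ y ∈ v :: t', x ≤ y := by
    rw [hpre, List.pairwise_append] at hs
    exact hs.2.2
  have hrest : ∀ y ∈ t', v ≤ y := by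
    rw [hpre, List.pairwise_append] at hs
    exact (List.pairwise_cons.mp hs.2.1).1
  have hprev : ∀ x ∈ pre, x ≤ v := fun x hx => hcross x hx v List.mem_cons_self
  by_cases hv : v = cv
  · -- same run continues
    subst hv
    simp only [runStep, beq_self_eq_true, if_true]
    refine ⟨List.mem_append_left _ h1, ?_, ?_, ?_, ?_⟩
    · intro x hx
      rcases List.mem_append.mp hx with h | h
      · exact h2 x h
      · simp at h; omega
    · simp [List.count_append, h3]
    · intro x hx hxne
      rcases List.mem_append.mp hx with h | h
      · rw [h4 x h hxne]
        simp [List.count_append, List.count_singleton]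
        omega
      · simp at h; omega
    · cases best with
      | none =>
        intro x hx
        rcases List.mem_append.mp hx with h | h
        · exact h5 x h
        · simpa using h
      | some p =>
        obtain ⟨b1, b2, b3, b4⟩ := h5
        exact ⟨List.mem_append_left _ b1, b2, b3, fun x hx hxne => by
          rcases List.mem_append.mp hx with h | h
          · exact b4 x h hxne
          · simp at h; omega⟩
  · -- new run starts
    have hble : cv ≤ v := hprev cv h1
    have hlt : cv < v := lt_of_le_of_ne hble (fun h => hv h.symm)
    have hvnotpre : v ∉ pre := fun h => absurd (h2 v h) (by omega)
    have hcvnot : cv ∉ v :: t' := by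
      intro h
      rcases List.mem_cons.mp h with h | h
      · omega
      · have := hrest cv h; omega
    have hcount_cv : s.count cv = pre.count cv := by
      simp [hpre, List.count_append, List.count_eq_zero.mpr hcvnot]
    have hbeq : (v == cv) = false := by simp [hv]
    simp only [runStep, hbeq, Bool.false_eq_true, if_false]
    refine ⟨List.mem_append_right _ List.mem_cons_self, ?_, ?_, ?_, ?_⟩
    · intro x hx
      rcases List.mem_append.mp hx with h | h
      · exact hprev x h
      · simp at h; omega
    · simp [List.count_append, List.count_eq_zero.mpr hvnotpre]
    · intro x hx hxne
      have hxpre : x ∈ pre := by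
        rcases List.mem_append.mp hx with h | h
        · exact h
        · simp at h; omega
      have hxv : x ≠ v := hxne
      have hxv0 : List.count x (pre ++ [v]) = List.count x pre := by
        rw [List.count_append, List.count_eq_zero.mpr (by simp [hxv] : x ∉ [v]), Nat.add_zero]
      rw [hxv0]
      by_cases hxcv : x = cv
      · subst hxcv; exact hcount_cv
      · exact h4 x hxpre hxcv
    · -- the best slot after (possibly) committing (cv, cc)
      cases best with
      | none =>
        simp only [if_true]
        refine ⟨List.mem_append_left _ h1, Ne.symm hv, by rw [h3, hcount_cv], ?_⟩
        intro x hx hxne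
        have hxpre : x ∈ pre := by
          rcases List.mem_append.mp hx with h | h
          · exact h
          · simp at h; exact absurd h hxne
        have := h5 x hxpre
        subst this
        exact ⟨le_refl _, fun _ => le_refl _⟩
      | some p =>
        obtain ⟨bv, bc⟩ := p
        obtain ⟨b1, b2, b3, b4⟩ := h5
        have hbvle : bv ≤ cv := h2 bv b1
        by_cases hcommit : cc ≤ bc
        · simp only [hcommit, decide_true, if_true]
          refine ⟨List.mem_append_left _ h1, Ne.symm hv, by rw [h3, hcount_cv], ?_⟩
          intro x hx hxne
          have hxpre : x ∈ pre := by
            rcases List.mem_append.mp hx with h | h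
            · exact h
            · simp at h; exact absurd h hxne
          by_cases hxcv : x = cv
          · subst hxcv; exact ⟨le_refl _, fun _ => le_refl _⟩
          · obtain ⟨c1, c2⟩ := b4 x hxpre hxcv
            have hccv : (s.count cv : Int) = cc := by rw [h3, hcount_cv]
            constructor
            · omega
            · intro hx2
              have hxb : s.count x = s.count bv := by omega
              have := c2 hxb
              omega
        · simp only [hcommit, decide_false, Bool.false_eq_true, if_false]
          refine ⟨List.mem_append_left _ b1, show bv ≠ v by intro h; omega, b3, ?_⟩
          intro x hx hxne
          have hxpre : x ∈ pre := by
            rcases List.mem_append.mp hx with h | h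
            · exact h
            · simp at h; exact absurd h hxne
          by_cases hxcv : x = cv
          · have hccv : (s.count x : Int) = cc := by rw [hxcv, h3, hcount_cv]
            constructor
            · omega
            · intro hx2; omega
          · exact b4 x hxpre hxcv

theorem fold_inv (s : List Int) (hs : List.Pairwise (fun a b : Int => a ≤ b) s) (t : List Int) :
    ∀ (pre : List Int) (cv cc : Int) (best : Option (Int × Int)),
      s = pre ++ t → RunInv s pre cv cc best →
      RunInv s s (t.foldl runStep (cv, cc, best)).1 (t.foldl runStep (cv, cc, best)).2.1
        (t.foldl runStep (cv, cc, best)).2.2 := by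
  induction t with
  | nil =>
    intro pre cv cc best hpre hinv
    simp only [List.append_nil] at hpre
    subst hpre
    simpa using hinv
  | cons v t' ih =>
    intro pre cv cc best hpre hinv
    have hstep := step_inv s pre t' v cv cc best hs hpre hinv
    have hpre' : s = (pre ++ [v]) ++ t' := by simpa using hpre
    have := ih (pre ++ [v]) (runStep (cv, cc, best) v).1 (runStep (cv, cc, best) v).2.1
      (runStep (cv, cc, best) v).2.2 hpre' hstep
    simpa using this

theorem solution_alt_isAns (arr : List Int) (n : Int) (hne : arr ≠ []) :
    IsAns arr (solution_alt arr n) := by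
  have hperm : (PySem.List.sorted arr (fun x => x) false).Perm arr := PySem.List.sorted_perm arr _ false
  have hpair : List.Pairwise (fun a b : Int => a ≤ b) (PySem.List.sorted arr (fun x => x) false) :=
    PySem.List.sorted_pairwise arr (fun x => x)
  suffices h : IsAns (PySem.List.sorted arr (fun x => x) false) (solution_alt arr n) by
    obtain ⟨hm, hmin, htie⟩ := h
    refine ⟨hperm.mem_iff.mp hm, ?_, ?_⟩
    · intro x hx
      rw [← hperm.count_eq, ← hperm.count_eq]
      exact hmin x (hperm.mem_iff.mpr hx)
    · intro x hx
      rw [← hperm.count_eq, ← hperm.count_eq]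
      exact htie x (hperm.mem_iff.mpr hx)
  set s := PySem.List.sorted arr (fun x => x) false with hsdef
  have hsne : s ≠ [] := by
    intro h
    rw [h] at hperm
    exact hne hperm.symm.eq_nil
  obtain ⟨v0, rest, hsc⟩ : ∃ v0 rest, s = v0 :: rest := by
    cases hx : s with
    | nil => exact absurd hx hsne
    | cons a t => exact ⟨a, t, rfl⟩
  have hinv0 : RunInv s [v0] v0 1 none := by
    refine ⟨List.mem_cons_self, ?_, by simp, ?_, ?_⟩
    · intro x hx; simp at hx; omega
    · intro x hx hxne; simp at hx; exact absurd hx hxne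
    · intro x hx; simpa using hx
  have hfin := fold_inv s hpair rest [v0] v0 1 none (by simpa using hsc) hinv0
  obtain ⟨f1, f2, f3, _, f5⟩ := hfin
  set st := rest.foldl runStep (v0, 1, none) with hst
  have hsa : solution_alt arr n =
      (match st.2.2 with
       | none => st.1
       | some (bv, bc) => if st.2.1 ≤ bc then st.1 else bv) := by
    simp only [solution_alt, ← hsdef, hsc]
    rfl
  cases hb : st.2.2 with
  | none =>
    have hval : solution_alt arr n = st.1 := by rw [hsa, hb]
    rw [hval]
    rw [hb] at f5
    refine ⟨f1, ?_, ?_⟩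
    · intro x hx; rw [f5 x hx]
    · intro x hx _; rw [f5 x hx]
  | some p =>
    obtain ⟨bv, bc⟩ := p
    have hval : solution_alt arr n = if st.2.1 ≤ bc then st.1 else bv := by rw [hsa, hb]
    rw [hb] at f5
    obtain ⟨b1, b2, b3, b4⟩ := f5
    have hbvle : bv ≤ st.1 := f2 bv b1
    rw [hval]
    by_cases hc : st.2.1 ≤ bc
    · rw [if_pos hc]
      refine ⟨f1, ?_, ?_⟩
      · intro x hx
        by_cases hxcv : x = st.1
        · subst hxcv; exact le_refl _
        · obtain ⟨c1, c2⟩ := b4 x hx hxcv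
          omega
      · intro x hx hx2
        by_cases hxcv : x = st.1
        · omega
        · obtain ⟨c1, c2⟩ := b4 x hx hxcv
          have hxb : s.count x = s.count bv := by omega
          have := c2 hxb
          omega
    · rw [if_neg hc]
      refine ⟨b1, ?_, ?_⟩
      · intro x hx
        by_cases hxcv : x = st.1
        · subst hxcv; omega
        · exact (b4 x hx hxcv).1
      · intro x hx hx2
        by_cases hxcv : x = st.1
        · subst hxcv; omega
        · exact (b4 x hx hxcv).2 hx2

-- ===== VERDICT (by name: the statement is the Claim_ definition above) =====
theorem solution_spec : Claim_equal_solution := by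
  intro arr n _ hpre
  unfold Spec_solution
  exact isAns_unique (solution_isAns arr n hpre) (solution_alt_isAns arr n hpre)
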